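-- pv_equiv track=rewrite | github.com/akandykeller/memn2n | wiki_data_utils.py | build_hash
-- ===== SOURCE A (Python) =====
-- import itertools
-- from collections import Counter
--
-- def get_word_freqs(docs):
--     # Flatten each document to single list, and flatten all docs together
--     wiki_vocab = list(itertools.chain.from_iterable(
--                             map(lambda x: list(itertools.chain.from_iterable(x)), docs)))
--
--     freqs = Counter(wiki_vocab)
--     return freqs
--
-- def build_hash(docs, questions, word_idx, freq_max=1000):
--     """
--     For each question, find documents which share at least one word
--     with Freq < 1,000.
--
--     Return dictionary mapping index of question to indexes of all sentences which
--     contain matching word.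
--     """
--     qa_train, qa_dev, qa_test = questions
--
--     freqs = get_word_freqs(docs)
--
--     word_to_sentence_idxs = {}
--
--     # For every word in vocab, if freq < 1000, get list of sentences indexes which
--     # contain that word
--     for word in word_idx:
--         if freqs[word] <= freq_max:
--             # Initialize empty list, begin adding sentence indexes
--             word_to_sentence_idxs[word] = []
--
--             # Loop over sentences (all documents combined)
--             for idx, sentence in enumerate(itertools.chain.from_iterable(docs)):
--                 if word in sentence:
--                     word_to_sentence_idxs[word].append(idx)
--
--
--     # For each question, combine all indexes of all words in the question
--     train_idxs = []
--     for q_idx, (q, a) in enumerate(qa_train):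
--         train_idxs.append([])
--         for word in q:
--             if freqs[word] <= freq_max:
--                 train_idxs[q_idx] += word_to_sentence_idxs[word]
--         train_idxs[q_idx] = set(train_idxs[q_idx])
--
--     dev_idxs = []
--     for q_idx, (q, a) in enumerate(qa_dev):
--         dev_idxs.append([])
--         for word in q:
--             if freqs[word] <= freq_max:
--                 dev_idxs[q_idx] += word_to_sentence_idxs[word]
--         dev_idxs[q_idx] = set(dev_idxs[q_idx])
--
--     test_idxs = []
--     for q_idx, (q, a) in enumerate(qa_test):
--         test_idxs.append([])
--         for word in q:
--             if freqs[word] <= freq_max: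
--                 test_idxs[q_idx] += word_to_sentence_idxs[word]
--         test_idxs[q_idx] = set(test_idxs[q_idx])
--
--     # Return hashes for all sets of questions
--     return train_idxs, dev_idxs, test_idxs
-- ===== SOURCE B (Python) =====
-- import itertools
-- from collections import Counter
--
-- def build_hash(docs, questions, word_idx, freq_max=1000):
--     """Single-pass inverted index over the rare vocabulary: one scan of the
--     sentences fills word -> sentence indexes; each question is then answered
--     by direct dictionary lookups."""
--     qa_train, qa_dev, qa_test = questions
--
--     freqs = Counter(w for doc in docs for sentence in doc for w in sentence)
--
--     index = {w: [] for w in word_idx if freqs[w] <= freq_max}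
--     for idx, sentence in enumerate(itertools.chain.from_iterable(docs)):
--         for w in set(sentence):
--             if w in index:
--                 index[w].append(idx)
--
--     def hash_questions(qa):
--         return [set(itertools.chain.from_iterable(
--                     index[w] for w in q if freqs[w] <= freq_max))
--                 for q, a in qa]
--
--     return (hash_questions(qa_train), hash_questions(qa_dev),
--             hash_questions(qa_test))
-- ===== Notes on version B (the rewrite author's own statement) =====
-- stated objective: alternative
-- what changed: A scans every sentence once per vocabulary word to build word->sentence-indexes; B builds the same index in a single pass over the sentences (appending idx to the entry of each distinct rare word of sentence idx) and answers each question by direct dictionary lookups.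
import Mathlib
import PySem

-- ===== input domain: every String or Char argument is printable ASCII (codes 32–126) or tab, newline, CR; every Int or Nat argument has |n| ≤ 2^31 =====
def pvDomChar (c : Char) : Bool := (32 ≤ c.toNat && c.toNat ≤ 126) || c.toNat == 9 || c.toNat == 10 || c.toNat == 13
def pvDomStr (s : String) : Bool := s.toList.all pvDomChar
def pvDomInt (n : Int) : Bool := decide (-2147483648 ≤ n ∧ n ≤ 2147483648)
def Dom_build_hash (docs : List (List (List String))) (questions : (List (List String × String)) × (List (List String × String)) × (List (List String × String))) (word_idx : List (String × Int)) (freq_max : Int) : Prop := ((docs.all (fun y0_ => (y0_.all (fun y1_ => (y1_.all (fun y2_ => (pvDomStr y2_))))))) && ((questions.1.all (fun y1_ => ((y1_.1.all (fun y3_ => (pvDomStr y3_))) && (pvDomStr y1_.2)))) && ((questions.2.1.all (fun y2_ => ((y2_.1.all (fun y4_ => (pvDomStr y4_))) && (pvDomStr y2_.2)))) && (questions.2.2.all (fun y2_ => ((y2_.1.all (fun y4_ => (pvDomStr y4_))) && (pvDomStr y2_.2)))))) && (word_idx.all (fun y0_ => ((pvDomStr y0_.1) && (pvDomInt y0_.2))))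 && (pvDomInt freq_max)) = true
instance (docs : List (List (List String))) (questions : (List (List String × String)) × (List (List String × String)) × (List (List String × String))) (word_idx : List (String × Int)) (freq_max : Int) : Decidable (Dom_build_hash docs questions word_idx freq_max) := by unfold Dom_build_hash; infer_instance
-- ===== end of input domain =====

-- B replaces A's per-vocabulary-word scan of all sentences by a single-pass inverted index
-- (word -> sentence indexes) over the rare vocabulary: a different algorithm of similar measured cost.

-- shared input views (used by both ports and by Pre_): the flattened token stream and sentence stream
def pvTokens (docs : List (List (List String))) : List String :=
  docs.flatMap (fun doc => doc.flatMap (fun s => s))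
def pvSents (docs : List (List (List String))) : List (List String) :=
  docs.flatMap (fun d => d)

-- ===== PORT A =====
-- get_word_freqs(docs) = Counter(chain(chain(doc) for doc in docs))
-- A's outer loop body: for one vocab word, if rare, scan ALL sentences and collect their indexes
def pvAstep (freqs : PySem.Dict String Int) (freq_max : Int) (sents : List (List String))
    (d : PySem.Dict String (List Int)) (word : String) : PySem.Dict String (List Int) :=
  if freqs.getD word 0 ≤ freq_max then
    (PySem.List.enumerate sents 0).foldl
      (fun d p => if p.2.contains word then d.modify word [] (fun v => v ++ [p.1]) else d)
      (d.insert word [])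
  else d

-- A's word_to_sentence_idxs: loop over the dict word_idx's keys
def pvA_w2s (docs : List (List (List String))) (word_idx : List (String × Int)) (freq_max : Int) :
    PySem.Dict String (List Int) :=
  (PySem.Dict.ofList word_idx).keys.foldl
    (pvAstep (PySem.Dict.counter (pvTokens docs)) freq_max (pvSents docs)) PySem.Dict.empty

-- A's per-question-set loop (the same loop A copy-pastes for train/dev/test):
-- append [], extend it per rare question word, then replace it by its set
def pvA_qidxs (freqs : PySem.Dict String Int) (w2s : PySem.Dict String (List Int)) (freq_max : Int)
    (qa : List (List String × String)) : List (List Int) :=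
  qa.foldl (fun acc q =>
    acc ++ [PySem.Set.ofList
      (q.1.foldl (fun cur word =>
        if freqs.getD word 0 ≤ freq_max then cur ++ w2s.getD word [] else cur) [])]) []

def build_hash (docs : List (List (List String))) (questions : (List (List String × String)) × (List (List String × String)) × (List (List String × String))) (word_idx : List (String × Int)) (freq_max : Int) : List (List Int) × List (List Int) × List (List Int) :=
  (pvA_qidxs (PySem.Dict.counter (pvTokens docs)) (pvA_w2s docs word_idx freq_max) freq_max questions.1,
   pvA_qidxs (PySem.Dict.counter (pvTokens docs)) (pvA_w2s docs word_idx freq_max) freq_max questions.2.1,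
   pvA_qidxs (PySem.Dict.counter (pvTokens docs)) (pvA_w2s docs word_idx freq_max) freq_max questions.2.2)

-- ===== PORT B =====
-- index = {w: [] for w in word_idx if freqs[w] <= freq_max}, then one pass over the
-- sentences: every (distinct) word of sentence idx that is a rare vocab word gets idx appended
def pvB_index (docs : List (List (List String))) (word_idx : List (String × Int)) (freq_max : Int) :
    PySem.Dict String (List Int) :=
  (PySem.List.enumerate (pvSents docs) 0).foldl
    (fun d p => (PySem.Set.ofList p.2).foldl
      (fun d w => if d.contains w then d.modify w [] (fun v => v ++ [p.1]) else d) d)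
    ((PySem.Dict.ofList word_idx).keys.foldl
      (fun d w => if (PySem.Dict.counter (pvTokens docs)).getD w 0 ≤ freq_max then d.insert w [] else d)
      PySem.Dict.empty)

-- [set(chain(index[w] for w in q if freqs[w] <= freq_max)) for q, a in qa]
def pvB_hashq (freqs : PySem.Dict String Int) (index : PySem.Dict String (List Int)) (freq_max : Int)
    (qa : List (List String × String)) : List (List Int) :=
  qa.map (fun q => PySem.Set.ofList
    ((q.1.filter (fun w => freqs.getD w 0 ≤ freq_max)).flatMap (fun w => index.getD w [])))

def build_hash_alt (docs : List (List (List String))) (questions : (List (List String × String)) × (List (List String × String)) × (List (List String × String))) (word_idx : List (String × Int)) (freq_max : Int) : List (List Int) × List (List Int) × List (List Int) :=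
  (pvB_hashq (PySem.Dict.counter (pvTokens docs)) (pvB_index docs word_idx freq_max) freq_max questions.1,
   pvB_hashq (PySem.Dict.counter (pvTokens docs)) (pvB_index docs word_idx freq_max) freq_max questions.2.1,
   pvB_hashq (PySem.Dict.counter (pvTokens docs)) (pvB_index docs word_idx freq_max) freq_max questions.2.2)

-- ===== PRECONDITION & SPEC =====
-- Pre_ excludes exactly the inputs on which A raises KeyError: a question word whose corpus
-- frequency is ≤ freq_max but which is not a key of word_idx.
def Pre_build_hash (docs : List (List (List String))) (questions : (List (List String × String)) × (List (List String × String)) × (List (List String × String))) (word_idx : List (String × Int)) (freq_max : Int) : Prop :=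
  ∀ qa ∈ questions.1 ++ questions.2.1 ++ questions.2.2, ∀ w ∈ qa.1,
    ((pvTokens docs).count w : Int) ≤ freq_max → w ∈ word_idx.map Prod.fst
instance (docs : List (List (List String))) (questions : (List (List String × String)) × (List (List String × String)) × (List (List String × String))) (word_idx : List (String × Int)) (freq_max : Int) : Decidable (Pre_build_hash docs questions word_idx freq_max) := by unfold Pre_build_hash; infer_instance

def pvWitness_build_hash : List (List (List String)) × ((List (List String × String)) × (List (List String × String)) × (List (List String × String))) × (List (String × Int)) × Int :=
  ([[["a", "b"], ["a"]]], ([([ "a" ], "b")], [], [([ "b" ], "a")]), [("a", 0), ("b", 1)], 1)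

def Spec_build_hash (docs : List (List (List String))) (questions : (List (List String × String)) × (List (List String × String)) × (List (List String × String))) (word_idx : List (String × Int)) (freq_max : Int) (out : List (List Int) × List (List Int) × List (List Int)) : Prop := out = build_hash_alt docs questions word_idx freq_max
instance (docs : List (List (List String))) (questions : (List (List String × String)) × (List (List String × String)) × (List (List String × String))) (word_idx : List (String × Int)) (freq_max : Int) (out : List (List Int) × List (List Int) × List (List Int)) : Decidable (Spec_build_hash docs questions word_idx freq_max out) := by unfold Spec_build_hash; infer_instance

-- ===== CLAIM (what is proved, stated in full; the proofs are below) =====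
def Claim_equal_build_hash : Prop := ∀ (docs : List (List (List String))) (questions : (List (List String × String)) × (List (List String × String)) × (List (List String × String))) (word_idx : List (String × Int)) (freq_max : Int), Dom_build_hash docs questions word_idx freq_max → Pre_build_hash docs questions word_idx freq_max → Spec_build_hash docs questions word_idx freq_max (build_hash docs questions word_idx freq_max)
-- ===== LEMMAS AND PROOFS =====

-- A's inner sentence scan for one word, on the getD view
theorem pv_scan_getD (w : String) (l : List (Int × List String)) (d : PySem.Dict String (List Int)) :
    (l.foldl (fun d p => if w ∈ p.2 then d.modify w [] (fun v => v ++ [p.1]) else d) d).getD w []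
      = d.getD w [] ++ (l.filter (fun p => decide (w ∈ p.2))).map (·.1) := by
  induction l generalizing d with
  | nil => simp
  | cons p l ih =>
    by_cases h : w ∈ p.2
    · simp [h, ih, PySem.Dict.getD_modify_self]
    · simp [h, ih]

-- the same scan leaves every other key alone
theorem pv_scan_getD_ne (w k : String) (hne : w ≠ k) (l : List (Int × List String))
    (d : PySem.Dict String (List Int)) :
    (l.foldl (fun d p => if k ∈ p.2 then d.modify k [] (fun v => v ++ [p.1]) else d) d).getD w []
      = d.getD w [] := by
  induction l generalizing d with
  | nil => simp
  | cons p l ih =>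
    by_cases h : k ∈ p.2
    · simp [h, ih, PySem.Dict.getD_modify_of_ne _ _ _ hne]
    · simp [h, ih]

-- A's outer loop: keys other than w never touch w's entry
theorem pvA_pres (freqs : PySem.Dict String Int) (fm : Int) (sents : List (List String))
    (ks : List String) (w : String) (hw : w ∉ ks) (d : PySem.Dict String (List Int)) :
    (ks.foldl (pvAstep freqs fm sents) d).getD w [] = d.getD w [] := by
  induction ks generalizing d with
  | nil => simp
  | cons k ks ih =>
    have hne : w ≠ k := fun h => hw (h ▸ List.mem_cons_self ..)
    have hw' : w ∉ ks := fun h => hw (List.mem_cons_of_mem _ h)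
    simp only [List.foldl_cons]
    rw [ih hw']
    unfold pvAstep
    by_cases hc : freqs.getD k 0 ≤ fm
    · simp [hc, pv_scan_getD_ne w k hne, PySem.Dict.getD_insert_of_ne _ _ _ hne]
    · simp [hc]

-- characterisation of A's word_to_sentence_idxs entry for a rare word present in the keys
theorem pvA_getD (freqs : PySem.Dict String Int) (fm : Int) (sents : List (List String))
    (ks : List String) (hnd : ks.Nodup) (w : String) (hw : w ∈ ks) (hc : freqs.getD w 0 ≤ fm)
    (d : PySem.Dict String (List Int)) :
    (ks.foldl (pvAstep freqs fm sents) d).getD w []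
      = ((PySem.List.enumerate sents 0).filter (fun p => decide (w ∈ p.2))).map (·.1) := by
  induction ks generalizing d with
  | nil => exact absurd hw (List.not_mem_nil)
  | cons k ks ih =>
    rcases List.nodup_cons.mp hnd with ⟨hk, hnd'⟩
    simp only [List.foldl_cons]
    by_cases h : w = k
    · subst h
      rw [pvA_pres freqs fm sents ks w hk]
      unfold pvAstep
      simp [hc, pv_scan_getD, PySem.Dict.getD_insert_self]
    · exact ih hnd' ((List.mem_cons.mp hw).resolve_left h) _

-- B's initial dict {w: [] for w in ks if c w}: every stored value is []
theorem pv_init_getD (c : String → Prop) [DecidablePred c] (ks : List String) (v : String)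
    (d : PySem.Dict String (List Int)) (h : d.getD v [] = []) :
    (ks.foldl (fun d w => if c w then d.insert w [] else d) d).getD v [] = [] := by
  induction ks generalizing d with
  | nil => exact h
  | cons k ks ih =>
    simp only [List.foldl_cons]
    by_cases hc : c k
    · refine ih _ ?_
      rw [if_pos hc, PySem.Dict.getD_insert]
      split_ifs <;> simp [h]
    · rw [if_neg hc]; exact ih _ h

-- a later insert never removes a key
theorem pv_init_mono (c : String → Prop) [DecidablePred c] (ks : List String) (v : String)
    (d : PySem.Dict String (List Int)) (h : d.contains v = true) :
    (ks.foldl (fun d w => if c w then d.insert w [] else d) d).contains v = true := by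
  induction ks generalizing d with
  | nil => exact h
  | cons k ks ih =>
    simp only [List.foldl_cons]
    refine ih _ ?_
    by_cases hc : c k
    · simp [hc, PySem.Dict.contains_insert, h]
    · simpa [hc] using h

-- every ks-member satisfying c becomes a key of B's initial dict
theorem pv_init_contains (c : String → Prop) [DecidablePred c] (ks : List String) (v : String)
    (hv : v ∈ ks) (hc : c v) (d : PySem.Dict String (List Int)) :
    (ks.foldl (fun d w => if c w then d.insert w [] else d) d).contains v = true := by
  induction ks generalizing d with
  | nil => exact absurd hv (List.not_mem_nil)
  | cons k ks ih =>
    simp only [List.foldl_cons]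
    by_cases h : v = k
    · subst h
      exact pv_init_mono c ks v _ (by simp [hc, PySem.Dict.contains_insert_self])
    · exact ih ((List.mem_cons.mp hv).resolve_left h) _

-- one sentence's (deduplicated) word loop in B never changes the key set
theorem pvB_sent_contains (ws : List String) (i : Int) (v : String)
    (d : PySem.Dict String (List Int)) :
    (ws.foldl (fun d w => if d.contains w then d.modify w [] (fun l => l ++ [i]) else d) d).contains v
      = d.contains v := by
  induction ws generalizing d with
  | nil => rfl
  | cons w ws ih =>
    simp only [List.foldl_cons]
    rw [ih]
    by_cases hdw : d.contains w
    · rw [if_pos hdw, PySem.Dict.contains_modify]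
      by_cases h : v = w
      · subst h; simp [hdw]
      · simp [h]
    · rw [if_neg hdw]

-- one sentence's word loop, on a key the dict holds: idx appended iff the sentence has the word
theorem pvB_sent_getD (ws : List String) (hnd : ws.Nodup) (i : Int) (w : String)
    (d : PySem.Dict String (List Int)) (hd : d.contains w = true) :
    (ws.foldl (fun d w' => if d.contains w' then d.modify w' [] (fun v => v ++ [i]) else d) d).getD w []
      = d.getD w [] ++ (if w ∈ ws then [i] else []) := by
  induction ws generalizing d with
  | nil => simp
  | cons w' ws ih =>
    rcases List.nodup_cons.mp hnd with ⟨hw', hnd'⟩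
    simp only [List.foldl_cons]
    by_cases h : w = w'
    · subst h
      rw [if_pos hd, ih hnd' _ (by simp [PySem.Dict.contains_modify, hd]),
          PySem.Dict.getD_modify_self]
      simp [hw']
    · by_cases hdw : d.contains w'
      · rw [if_pos hdw, ih hnd' _ (by simp [PySem.Dict.contains_modify, hd]),
            PySem.Dict.getD_modify_of_ne _ _ _ h]
        simp [List.mem_cons, h]
      · rw [if_neg hdw, ih hnd' _ hd]
        simp [List.mem_cons, h]

-- characterisation of B's inverted index entry for a key of the initial dict
theorem pvB_pass_getD (w : String) (l : List (Int × List String)) (d : PySem.Dict String (List Int))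
    (hd : d.contains w = true) :
    (l.foldl (fun d p => (PySem.Set.ofList p.2).foldl
        (fun d w' => if d.contains w' then d.modify w' [] (fun v => v ++ [p.1]) else d) d) d).getD w []
      = d.getD w [] ++ (l.filter (fun p => decide (w ∈ p.2))).map (·.1) := by
  induction l generalizing d with
  | nil => simp
  | cons p l ih =>
    simp only [List.foldl_cons]
    rw [ih _ (by rw [pvB_sent_contains]; exact hd),
        pvB_sent_getD _ (PySem.Set.nodup_ofList _) p.1 w d hd]
    by_cases h : w ∈ p.2
    · have hm : w ∈ PySem.Set.ofList p.2 := (PySem.Set.mem_ofList _ _).mpr h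
      simp [h, hm]
    · have hm : w ∉ PySem.Set.ofList p.2 := fun hmm => h ((PySem.Set.mem_ofList _ _).mp hmm)
      simp [h, hm]

theorem pvB_index_getD (docs : List (List (List String))) (word_idx : List (String × Int)) (fm : Int)
    (w : String) (hw : w ∈ (PySem.Dict.ofList word_idx).keys)
    (hc : (PySem.Dict.counter (pvTokens docs)).getD w 0 ≤ fm) :
    (pvB_index docs word_idx fm).getD w []
      = ((PySem.List.enumerate (pvSents docs) 0).filter (fun p => decide (w ∈ p.2))).map (·.1) := by
  unfold pvB_index
  rw [pvB_pass_getD w _ _ (pv_init_contains _ _ w hw hc PySem.Dict.empty),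
      pv_init_getD _ _ w PySem.Dict.empty (PySem.Dict.getD_empty _ _)]
  simp

-- keys of the dict built from word_idx-- keys of the dict built from word_idx = its first-occurrence-deduplicated key column
theorem pv_keys_ofList (l : List (String × Int)) :
    (PySem.Dict.ofList l).keys = PySem.Set.ofList (l.map Prod.fst) := by
  show (List.foldl (fun d (x : String × Int) => d.insert x.1 x.2) PySem.Dict.empty l).keys = _
  rw [PySem.Dict.keys_foldl_insert_key l Prod.fst (fun _ x => x.2)]
  simp [PySem.Set.update_nil_left, PySem.Dict.keys_empty]

-- 'if cond: out += g(x)' loop = filter + flatMap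
theorem pv_foldl_extend_if {α β : Type} (p : α → Prop) [DecidablePred p] (g : α → List β)
    (l : List α) (acc : List β) :
    l.foldl (fun acc x => if p x then acc ++ g x else acc) acc
      = acc ++ (l.filter (fun x => decide (p x))).flatMap g := by
  induction l generalizing acc with
  | nil => simp
  | cons x l ih =>
    by_cases h : p x
    · simp [h, ih]
    · simp [h, ih]

-- the per-question-set loops agree, given that every rare question word is a word_idx key
theorem pv_qlist_eq (docs : List (List (List String))) (word_idx : List (String × Int)) (fm : Int)
    (qa : List (List String × String))
    (hq : ∀ q ∈ qa, ∀ w ∈ q.1, ((pvTokens docs).count w : Int) ≤ fm → w ∈ word_idx.map Prod.fst) :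
    pvA_qidxs (PySem.Dict.counter (pvTokens docs)) (pvA_w2s docs word_idx fm) fm qa
      = pvB_hashq (PySem.Dict.counter (pvTokens docs)) (pvB_index docs word_idx fm) fm qa := by
  unfold pvA_qidxs pvB_hashq
  rw [PySem.List.foldl_append_singleton_eq_map]
  simp only [List.nil_append]
  apply List.map_eq_map_iff.mpr
  intro q hqmem
  congr 1
  rw [pv_foldl_extend_if (fun w => (PySem.Dict.counter (pvTokens docs)).getD w 0 ≤ fm)
        (fun w => (pvA_w2s docs word_idx fm).getD w []) q.1 []]
  simp only [List.nil_append]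
  apply List.flatMap_congr
  intro w hw
  have hw' : w ∈ q.1 := List.mem_of_mem_filter hw
  have hcond : ((PySem.Dict.counter (pvTokens docs)).getD w 0 ≤ fm) := by
    have := List.of_mem_filter hw
    simpa using this
  have hcount : ((pvTokens docs).count w : Int) ≤ fm := by
    rwa [PySem.Dict.getD_counter] at hcond
  have hmem : w ∈ (PySem.Dict.ofList word_idx).keys := by
    rw [pv_keys_ofList]
    exact (PySem.Set.mem_ofList _ _).mpr (hq q hqmem w hw' hcount)
  unfold pvA_w2s
  rw [pvA_getD _ fm _ _ (PySem.Dict.nodup_keys_ofList word_idx) w hmem hcond PySem.Dict.empty,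
      pvB_index_getD docs word_idx fm w hmem hcond]
-- ===== VERDICT (by name: the statement is the Claim_ definition above) =====
theorem build_hash_spec : Claim_equal_build_hash := by
  intro docs questions word_idx freq_max _ hpre
  show build_hash docs questions word_idx freq_max = build_hash_alt docs questions word_idx freq_max
  unfold build_hash build_hash_alt
  refine Prod.ext ?_ (Prod.ext ?_ ?_) <;>
    apply pv_qlist_eq <;>
    intro q hq w hw hc <;>
    exact hpre q (by simp [hq]) w hw hc
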